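-- pv_equiv track=rewrite | github.com/kaiko-ai/eva | src/eva/vision/data/datasets/_utils.py | indices_to_ranges
-- ===== SOURCE A (Python) =====
-- from typing import List, Sequence, Tuple
--
-- def indices_to_ranges(indices: List[int]) -> List[Tuple[int, int]]:
--     """Turns a list of indices to a list of ranges.
--
--     The produced range intervals are half-open inequalities: start <= x < end.
--
--     Args:
--         indices: The list of indices to produce the ranges from.
--
--     Return:
--         A list of half-open intervals.
--
--     Example:
--         >>> indices = [0, 1, 2, 4, 6, 7, 8]
--         >>> ranges = indices_to_ranges(indices)
--         >>> assert ranges == [(0, 3), (4, 5), (6, 9)]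
--     """
--     ranges = []
--     start_index = 0
--     for i, current in enumerate(indices):
--         if i + 1 < len(indices) and current + 1 == indices[i + 1]:
--             continue
--
--         start = indices[start_index]
--         end = start if start_index == i else current
--         ranges.append((start, end + 1))
--         start_index = i + 1
--
--     return ranges
-- ===== SOURCE B (Python) =====
-- def indices_to_ranges(indices):
--     """Staged rewrite: first find all cut positions where consecutiveness breaks,
--     then build one range per adjacent pair of cuts."""
--     if not indices:
--         return []
--     n = len(indices)
--     cuts = [0] + [i for i in range(1, n) if indices[i] != indices[i - 1] + 1] + [n]
--     return [(indices[a], indices[b - 1] + 1) for a, b in zip(cuts, cuts[1:])]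
-- ===== Notes on version B (the rewrite author's own statement) =====
-- stated objective: alternative
-- what changed: Replaced A's single stateful scan (enumerate with lookahead and start_index bookkeeping) by a staged computation: one comprehension collects all cut positions where indices[i] != indices[i-1]+1, then a second comprehension zips adjacent cut pairs into (indices[a], indices[b-1]+1) ranges.
import Mathlib
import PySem

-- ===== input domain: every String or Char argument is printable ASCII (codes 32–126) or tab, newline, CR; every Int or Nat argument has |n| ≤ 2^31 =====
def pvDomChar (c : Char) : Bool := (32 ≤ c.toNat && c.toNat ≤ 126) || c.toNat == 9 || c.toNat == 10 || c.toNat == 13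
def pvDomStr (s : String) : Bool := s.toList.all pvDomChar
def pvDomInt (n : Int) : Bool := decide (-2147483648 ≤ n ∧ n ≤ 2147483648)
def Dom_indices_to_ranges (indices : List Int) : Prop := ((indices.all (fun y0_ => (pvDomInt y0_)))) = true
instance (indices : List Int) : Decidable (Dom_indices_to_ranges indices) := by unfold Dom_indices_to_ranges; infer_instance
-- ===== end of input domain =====

-- B replaces A's single stateful scan by two staged passes: collect cut positions, then zip adjacent cuts into ranges; alternative decomposition, same cost.

-- ===== PORT A =====
-- literal port of A: foldl over enumerate(indices) with state (ranges, start_index)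
def indices_to_ranges (indices : List Int) : List (Int × Int) :=
  ((PySem.List.enumerate indices 0).foldl
    (fun (st : List (Int × Int) × Int) (p : Int × Int) =>
      if p.1 + 1 < (indices.length : Int) ∧
          PySem.List.pyGetD indices (p.1 + 1) 0 = p.2 + 1 then st
      else
        let start := PySem.List.pyGetD indices st.2 0
        let e := if st.2 = p.1 then start else p.2
        (st.1 ++ [(start, e + 1)], p.1 + 1))
    ([], 0)).1

-- ===== PORT B =====
-- literal port of Source B: early return on [], then cuts = [0] + breaks + [n], and one range per
-- adjacent cut pair (cuts[1:] is the drop-1 suffix, exact for this nonnegative slice)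
def indices_to_ranges_alt (indices : List Int) : List (Int × Int) :=
  match indices with
  | [] => []
  | _ :: _ =>
    let n : Int := indices.length
    let cuts : List Int :=
      0 :: (PySem.List.pyRange 1 n 1).filter
        (fun i => PySem.List.pyGetD indices i 0 ≠ PySem.List.pyGetD indices (i - 1) 0 + 1)
      ++ [n]
    (cuts.zip (cuts.drop 1)).map
      (fun p => (PySem.List.pyGetD indices p.1 0, PySem.List.pyGetD indices (p.2 - 1) 0 + 1))

-- ===== PRECONDITION & SPEC =====
def Spec_indices_to_ranges (indices : List Int) (out : List (Int × Int)) : Prop := out = indices_to_ranges_alt indices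
instance (indices : List Int) (out : List (Int × Int)) : Decidable (Spec_indices_to_ranges indices out) := by unfold Spec_indices_to_ranges; infer_instance

-- ===== CLAIM (what is proved, stated in full; the proofs are below) =====
def Claim_equal_indices_to_ranges : Prop := ∀ (indices : List Int), Dom_indices_to_ranges indices → Spec_indices_to_ranges indices (indices_to_ranges indices)

-- ===== LEMMAS AND PROOFS =====

-- reference: maximal consecutive runs, carrying (start, last)
def runsGo (s l : Int) : List Int → List (Int × Int)
  | [] => [(s, l + 1)]
  | x :: xs => if x = l + 1 then runsGo s x xs else (s, l + 1) :: runsGo x x xs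

theorem enum_drop (xs : List Int) : ∀ (k : Nat) (s : Int),
    (PySem.List.enumerate xs s).drop k = PySem.List.enumerate (xs.drop k) (s + k) := by
  induction xs with
  | nil => intro k s; simp [PySem.List.enumerate_nil]
  | cons x xs ih =>
    intro k s
    cases k with
    | zero => simp
    | succ k =>
      simp only [PySem.List.enumerate_cons, List.drop_succ_cons]
      rw [ih k (s + 1)]
      congr 1
      push_cast
      ring

-- A's loop body, named for the proofs
def stepA (ind : List Int) (st : List (Int × Int) × Int) (p : Int × Int) : List (Int × Int) × Int :=
  if p.1 + 1 < (ind.length : Int) ∧ PySem.List.pyGetD ind (p.1 + 1) 0 = p.2 + 1 then st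
  else (st.1 ++ [(PySem.List.pyGetD ind st.2 0,
        (if st.2 = p.1 then PySem.List.pyGetD ind st.2 0 else p.2) + 1)], p.1 + 1)

theorem a_eq_fold_stepA (ind : List Int) :
    indices_to_ranges ind = ((PySem.List.enumerate ind 0).foldl (stepA ind) ([], 0)).1 := rfl

-- A's fold over the enumerated suffix, with a run in progress from position s to k
theorem a_fold_inv (m : Nat) : ∀ (ind : List Int) (k s : Nat) (acc : List (Int × Int)),
    ind.length - k = m → s ≤ k → k < ind.length →
    (∀ j, s ≤ j → j < k → ind.getD (j + 1) 0 = ind.getD j 0 + 1) →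
    (((PySem.List.enumerate ind 0).drop k).foldl (stepA ind) (acc, (s : Int))).1
    = acc ++ runsGo (ind.getD s 0) (ind.getD k 0) (ind.drop (k + 1)) := by
  induction m with
  | zero =>
    intro ind k s acc hm hs hk _
    exact absurd hk (by omega)
  | succ m ih =>
    intro ind k s acc hm hs hk hrun
    have hcast : ((k : Int) + 1) = ((k + 1 : Nat) : Int) := by push_cast; ring
    have hdropk : ind.drop k = ind.getD k 0 :: ind.drop (k + 1) := by
      rw [List.drop_eq_getElem_cons hk, List.getD_eq_getElem ind 0 hk]
    have henum : (PySem.List.enumerate ind 0).drop k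
        = ((k : Int), ind.getD k 0) :: PySem.List.enumerate (ind.drop (k + 1)) ((k + 1 : Nat) : Int) := by
      rw [enum_drop ind k 0, hdropk, PySem.List.enumerate_cons]
      simp only [zero_add]
      rw [hcast]
    have henum2 : PySem.List.enumerate (ind.drop (k + 1)) ((k + 1 : Nat) : Int)
        = (PySem.List.enumerate ind 0).drop (k + 1) := by
      rw [enum_drop ind (k + 1) 0]
      simp only [zero_add]
    rw [henum, List.foldl_cons, henum2]
    by_cases hcond : ((k : Int) + 1 < (ind.length : Int) ∧
        PySem.List.pyGetD ind ((k : Int) + 1) 0 = ind.getD k 0 + 1)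
    · -- run continues: the step keeps the state
      have hstep : stepA ind (acc, (s : Int)) ((k : Int), ind.getD k 0) = (acc, (s : Int)) := by
        simp only [stepA]
        rw [if_pos hcond]
      have hk1 : k + 1 < ind.length := by exact_mod_cast hcast ▸ hcond.1
      have hnext : ind.getD (k + 1) 0 = ind.getD k 0 + 1 := by
        have h2 := hcond.2
        rw [hcast, PySem.List.pyGetD_natCast] at h2
        exact h2
      have hrun1 : ∀ j, s ≤ j → j < k + 1 → ind.getD (j + 1) 0 = ind.getD j 0 + 1 := by
        intro j h1 h2
        rcases Nat.lt_succ_iff_lt_or_eq.mp h2 with h | h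
        · exact hrun j h1 h
        · subst h; exact hnext
      rw [hstep, ih ind (k + 1) s acc (by omega) (by omega) hk1 hrun1]
      have hdropk1 : ind.drop (k + 1) = ind.getD (k + 1) 0 :: ind.drop (k + 1 + 1) := by
        rw [List.drop_eq_getElem_cons hk1, List.getD_eq_getElem ind 0 hk1]
      rw [hdropk1]
      simp only [runsGo]
      rw [if_pos hnext, hnext]
    · -- run breaks: the step emits (start, last + 1)
      have hstep : stepA ind (acc, (s : Int)) ((k : Int), ind.getD k 0)
          = (acc ++ [(ind.getD s 0, ind.getD k 0 + 1)], (k : Int) + 1) := by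
        simp only [stepA]
        rw [if_neg hcond, PySem.List.pyGetD_natCast]
        by_cases hsk : s = k
        · subst hsk; rw [if_pos rfl]
        · rw [if_neg (by exact_mod_cast hsk)]
      rw [hstep]
      by_cases hend : k + 1 = ind.length
      · -- last element: nothing left to fold
        have h1 : (PySem.List.enumerate ind 0).drop (k + 1) = [] := by
          apply List.drop_eq_nil_of_le
          rw [PySem.List.length_enumerate]
          omega
        have h2 : ind.drop (k + 1) = [] := List.drop_eq_nil_of_le (by omega)
        rw [h1, List.foldl_nil, h2]
        simp [runsGo]
      · have hk1 : k + 1 < ind.length := by omega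
        have hne : ind.getD (k + 1) 0 ≠ ind.getD k 0 + 1 := by
          intro h
          apply hcond
          refine ⟨by exact_mod_cast hcast ▸ (by exact_mod_cast hk1 : ((k+1:Nat):Int) < (ind.length : Int)), ?_⟩
          rw [hcast, PySem.List.pyGetD_natCast]
          exact h
        rw [hcast, ih ind (k + 1) (k + 1) (acc ++ [(ind.getD s 0, ind.getD k 0 + 1)])
          (by omega) (le_refl _) hk1 (by intro j h1 h2; omega)]
        have hdropk1 : ind.drop (k + 1) = ind.getD (k + 1) 0 :: ind.drop (k + 1 + 1) := by
          rw [List.drop_eq_getElem_cons hk1, List.getD_eq_getElem ind 0 hk1]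
        rw [hdropk1]
        simp only [runsGo]
        rw [if_neg hne]
        simp

-- ===== B side: the cut list characterizes the runs =====

-- map over adjacent pairs of the cut list (B's final comprehension)
def pairMapB (ind : List Int) (l : List Int) : List (Int × Int) :=
  (l.zip (l.drop 1)).map
    (fun p => (PySem.List.pyGetD ind p.1 0, PySem.List.pyGetD ind (p.2 - 1) 0 + 1))

theorem pairMapB_cons_cons (ind : List Int) (a b : Int) (r : List Int) :
    pairMapB ind (a :: b :: r)
    = (PySem.List.pyGetD ind a 0, PySem.List.pyGetD ind (b - 1) 0 + 1) :: pairMapB ind (b :: r) := by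
  simp [pairMapB]

-- B's suffix of the cut list, starting a range at position s with k the next unexamined break candidate - 1
theorem b_inv (m : Nat) : ∀ (ind : List Int) (k s : Nat),
    ind.length - k = m → k < ind.length →
    pairMapB ind ((s : Int) ::
      (PySem.List.pyRange ((k : Int) + 1) (ind.length : Int) 1).filter
        (fun i => PySem.List.pyGetD ind i 0 ≠ PySem.List.pyGetD ind (i - 1) 0 + 1)
      ++ [(ind.length : Int)])
    = runsGo (ind.getD s 0) (ind.getD k 0) (ind.drop (k + 1)) := by
  induction m with
  | zero =>
    intro ind k s hm hk
    exact absurd hk (by omega)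
  | succ m ih =>
    intro ind k s hm hk
    have hcast : ((k : Int) + 1) = ((k + 1 : Nat) : Int) := by push_cast; ring
    by_cases hend : k + 1 = ind.length
    · -- last position: no remaining break candidates, single closing range
      have hr : PySem.List.pyRange ((k : Int) + 1) (ind.length : Int) 1 = [] := by
        apply PySem.List.pyRange_one_eq_nil
        omega
      have h2 : ind.drop (k + 1) = [] := List.drop_eq_nil_of_le (by omega)
      rw [hr, h2]
      simp only [List.filter_nil]
      show pairMapB ind ((s : Int) :: (ind.length : Int) :: []) = _
      rw [pairMapB_cons_cons]
      have : ((ind.length : Int) - 1) = ((k : Nat) : Int) := by omega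
      rw [this, PySem.List.pyGetD_natCast, PySem.List.pyGetD_natCast]
      simp [pairMapB, runsGo]
    · have hk1 : k + 1 < ind.length := by omega
      have hrc : PySem.List.pyRange ((k : Int) + 1) (ind.length : Int) 1
          = ((k : Int) + 1) :: PySem.List.pyRange ((k : Int) + 1 + 1) (ind.length : Int) 1 :=
        PySem.List.pyRange_one_cons (by omega)
      have hdropk1 : ind.drop (k + 1) = ind.getD (k + 1) 0 :: ind.drop (k + 1 + 1) := by
        rw [List.drop_eq_getElem_cons hk1, List.getD_eq_getElem ind 0 hk1]
      have hval : PySem.List.pyGetD ind ((k : Int) + 1) 0 = ind.getD (k + 1) 0 := by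
        rw [hcast, PySem.List.pyGetD_natCast]
      have hval' : PySem.List.pyGetD ind ((k : Int) + 1 - 1) 0 = ind.getD k 0 := by
        have : ((k : Int) + 1 - 1) = ((k : Nat) : Int) := by ring
        rw [this, PySem.List.pyGetD_natCast]
      rw [hrc, hdropk1]
      simp only [List.filter_cons]
      by_cases hbrk : ind.getD (k + 1) 0 = ind.getD k 0 + 1
      · -- run continues: position k+1 is not a cut
        have hc : (decide (PySem.List.pyGetD ind ((k : Int) + 1) 0
            ≠ PySem.List.pyGetD ind ((k : Int) + 1 - 1) 0 + 1)) = false := by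
          rw [hval, hval']
          simp only [ne_eq, hbrk]
          simp
        rw [hc]
        simp only [Bool.false_eq_true, if_false, runsGo, if_pos hbrk]
        have := ih ind (k + 1) s (by omega) hk1
        rw [hcast]
        exact this
      · -- run breaks: position k+1 is a cut
        have hc : (decide (PySem.List.pyGetD ind ((k : Int) + 1) 0
            ≠ PySem.List.pyGetD ind ((k : Int) + 1 - 1) 0 + 1)) = true := by
          rw [hval, hval']
          simp only [ne_eq, decide_eq_true_eq]
          exact hbrk
        rw [hc]
        simp only [if_true, List.cons_append, runsGo, if_neg hbrk]
        rw [pairMapB_cons_cons, hval']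
        congr 1
        · rw [PySem.List.pyGetD_natCast]
        · have := ih ind (k + 1) (k + 1) (by omega) hk1
          rw [hcast]
          exact this

theorem alt_eq_runsGo (x0 : Int) (rest : List Int) :
    indices_to_ranges_alt (x0 :: rest) = runsGo x0 x0 rest := by
  have h := b_inv (x0 :: rest).length (x0 :: rest) 0 0 (by omega) (by simp)
  simp only [Nat.cast_zero, zero_add, List.getD_cons_zero, List.drop_one, List.tail_cons] at h
  show pairMapB (x0 :: rest) (0 :: _ ++ [((x0 :: rest).length : Int)]) = _
  exact h

-- chain A = B
theorem a_eq_alt (ind : List Int) : indices_to_ranges ind = indices_to_ranges_alt ind := by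
  cases ind with
  | nil => rfl
  | cons x xs =>
    rw [alt_eq_runsGo, a_eq_fold_stepA]
    have h := a_fold_inv ((x :: xs).length) (x :: xs) 0 0 [] (by omega) (le_refl _)
      (by simp) (by intro j h1 h2; omega)
    simp only [List.drop_zero, Nat.cast_zero] at h
    rw [h]
    simp

-- ===== VERDICT (by name: the statement is the Claim_ definition above) =====
theorem indices_to_ranges_spec : Claim_equal_indices_to_ranges := by
  intro ind _
  unfold Spec_indices_to_ranges
  exact a_eq_alt ind
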